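-- pv_equiv track=rewrite | github.com/drbeco/rubikeco | rubikeco.py | objetivo
-- ===== SOURCE A (Python) =====
-- back=0; left=1; up=2; right=3; down=4; front=5;
--
-- back=0; left=1; up=2; right=3; down=4; front=5;
--
-- rubik = [['0o','1o','2o','3o','4o','5o','6o','7o','8o'],
--          ['0g','1g','2g','3g','4g','5g','6g','7g','8g'],
--          ['0w','1w','2w','3w','4w','5w','6w','7w','8w'],
--          ['0b','1b','2b','3b','4b','5b','6b','7b','8b'],
--          ['0y','1y','2y','3y','4y','5y','6y','7y','8y'],
--          ['0r','1r','2r','3r','4r','5r','6r','7r','8r']]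
--
-- def objetivo(t, obj):
--     """
--         Funcao que retorna verdadeiro/falso se o objetivo corrente foi alcancado
--     """
--     if obj == 'white_up':
--         if t[up][4] == '4w' and t[front][4] == '4r':
--             return True
--         else:
--             return False
--
--     if obj == 'white_cross':
--         if objetivo(t, 'white_up') \
--         and t[up][1] == '1w' and t[up][3] == '3w' and t[up][4] == '4w' and t[up][5] == '5w' and t[up][7] == '7w':
--             return True
--         else:
--             return False
--
--     if obj == 'white_corners':
--         if objetivo(t, 'white_cross') \
--         and t[up][0] == '0w' and t[up][2] == '2w' and t[up][6] == '6w' and t[up][8] == '8w':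
--             return True
--         else:
--             return False
--
--     if obj == 'yellow_up':
--         if t[up][4] == '4y' and t[front][4] == '4o':
--             return True
--         else:
--             return False
--
--     if obj == 'solve':
--         if t == rubik:
--             return True
--         else:
--             return False
--     return False #objective not found
-- ===== SOURCE B (Python) =====
-- back=0; left=1; up=2; right=3; down=4; front=5
--
-- rubik = [['0o','1o','2o','3o','4o','5o','6o','7o','8o'],
--          ['0g','1g','2g','3g','4g','5g','6g','7g','8g'],
--          ['0w','1w','2w','3w','4w','5w','6w','7w','8w'],
--          ['0b','1b','2b','3b','4b','5b','6b','7b','8b'],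
--          ['0y','1y','2y','3y','4y','5y','6y','7y','8y'],
--          ['0r','1r','2r','3r','4r','5r','6r','7r','8r']]
--
-- _WHITE_UP = [(up, 4, '4w'), (front, 4, '4r')]
-- _WHITE_CROSS = _WHITE_UP + [(up, 1, '1w'), (up, 3, '3w'), (up, 4, '4w'),
--                             (up, 5, '5w'), (up, 7, '7w')]
-- _WHITE_CORNERS = _WHITE_CROSS + [(up, 0, '0w'), (up, 2, '2w'),
--                                  (up, 6, '6w'), (up, 8, '8w')]
-- _GOALS = {'white_up': _WHITE_UP,
--           'white_cross': _WHITE_CROSS,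
--           'white_corners': _WHITE_CORNERS,
--           'yellow_up': [(up, 4, '4y'), (front, 4, '4o')]}
--
-- def objetivo(t, obj):
--     """
--         Funcao que retorna verdadeiro/falso se o objetivo corrente foi alcancado
--     """
--     if obj == 'solve':
--         return t == rubik
--     cs = _GOALS.get(obj)
--     if cs is None:
--         return False  # objective not found
--     return all(t[f][i] == v for f, i, v in cs)
-- ===== Notes on version B (the rewrite author's own statement) =====
-- stated objective: simpler
-- what changed: Replaces the recursive chain of if-branches by a data table mapping each goal name to its ordered list of (face,index,value) sticker constraints (layered goals spelled out by list concatenation), evaluated with a single all() scan; 'solve' stays the literal t == rubik comparison and unknown goals fall out of the table as False.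
-- outside the precondition, e.g. on objetivo([[], [], ['a', 'b', 'c', 'd', 'e'], []], 'white_up'): A returns False, B returns False
import Mathlib
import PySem

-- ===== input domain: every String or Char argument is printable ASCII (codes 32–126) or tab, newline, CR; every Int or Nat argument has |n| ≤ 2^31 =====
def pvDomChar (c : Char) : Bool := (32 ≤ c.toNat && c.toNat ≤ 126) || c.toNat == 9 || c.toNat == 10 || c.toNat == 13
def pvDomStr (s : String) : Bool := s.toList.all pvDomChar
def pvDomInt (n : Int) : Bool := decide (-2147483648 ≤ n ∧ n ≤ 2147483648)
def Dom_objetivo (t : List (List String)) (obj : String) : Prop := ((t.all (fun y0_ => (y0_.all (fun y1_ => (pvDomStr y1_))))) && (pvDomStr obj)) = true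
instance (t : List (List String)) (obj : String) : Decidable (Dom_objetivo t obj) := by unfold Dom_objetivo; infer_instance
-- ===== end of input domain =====

-- B replaces A's recursive if-branch chain by a goal→constraint-list table scanned with all(); same values inside Pre_ (objective: simpler).

def rubikL : List (List String) :=
  [["0o","1o","2o","3o","4o","5o","6o","7o","8o"],
   ["0g","1g","2g","3g","4g","5g","6g","7g","8g"],
   ["0w","1w","2w","3w","4w","5w","6w","7w","8w"],
   ["0b","1b","2b","3b","4b","5b","6b","7b","8b"],
   ["0y","1y","2y","3y","4y","5y","6y","7y","8y"],
   ["0r","1r","2r","3r","4r","5r","6r","7r","8r"]]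

-- ===== PORT A =====
-- t[f][i]; out-of-range default "" is never reached inside Pre_objetivo (Python raises IndexError there)
def aGet (t : List (List String)) (f i : Int) : String :=
  (PySem.List.pyGet? ((PySem.List.pyGet? t f).getD []) i).getD ""

def aWhiteUp (t : List (List String)) : Bool :=
  if aGet t 2 4 == "4w" && aGet t 5 4 == "4r" then true else false

def aWhiteCross (t : List (List String)) : Bool :=
  if aWhiteUp t && aGet t 2 1 == "1w" && aGet t 2 3 == "3w" && aGet t 2 4 == "4w"
      && aGet t 2 5 == "5w" && aGet t 2 7 == "7w" then true else false

def aWhiteCorners (t : List (List String)) : Bool :=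
  if aWhiteCross t && aGet t 2 0 == "0w" && aGet t 2 2 == "2w" && aGet t 2 6 == "6w"
      && aGet t 2 8 == "8w" then true else false

def aYellowUp (t : List (List String)) : Bool :=
  if aGet t 2 4 == "4y" && aGet t 5 4 == "4o" then true else false

def objetivo (t : List (List String)) (obj : String) : Bool :=
  if obj == "white_up" then aWhiteUp t
  else if obj == "white_cross" then aWhiteCross t
  else if obj == "white_corners" then aWhiteCorners t
  else if obj == "yellow_up" then aYellowUp t
  else if obj == "solve" then (if t == rubikL then true else false)
  else false

-- ===== PORT B =====
def whiteUpCs : List (Nat × Nat × String) := [(2, 4, "4w"), (5, 4, "4r")]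
def whiteCrossCs : List (Nat × Nat × String) :=
  whiteUpCs ++ [(2, 1, "1w"), (2, 3, "3w"), (2, 4, "4w"), (2, 5, "5w"), (2, 7, "7w")]
def whiteCornersCs : List (Nat × Nat × String) :=
  whiteCrossCs ++ [(2, 0, "0w"), (2, 2, "2w"), (2, 6, "6w"), (2, 8, "8w")]
def goalTable : PySem.Dict String (List (Nat × Nat × String)) :=
  PySem.Dict.ofList
    [("white_up", whiteUpCs), ("white_cross", whiteCrossCs),
     ("white_corners", whiteCornersCs), ("yellow_up", [(2, 4, "4y"), (5, 4, "4o")])]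

-- t[f][i]; default "" unreachable inside Pre_objetivo (Python raises IndexError there)
def bGet (t : List (List String)) (f i : Nat) : String := (t.getD f []).getD i ""

def objetivo_alt (t : List (List String)) (obj : String) : Bool :=
  if obj == "solve" then t == rubikL
  else
    match goalTable.get? obj with
    | some cs => cs.all (fun c => bGet t c.1 c.2.1 == c.2.2)
    | none => false

-- ===== PRECONDITION & SPEC =====
-- Pre_ requires the full board shape (6 faces, 9 up-stickers, 5 front-stickers) for the four
-- goal objectives; A can still RETURN False on smaller boards when an early sticker mismatch
-- short-circuits the 'and' chain before a missing index is touched — B returns False there too.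
def Pre_objetivo (t : List (List String)) (obj : String) : Prop :=
  (obj = "white_up" ∨ obj = "white_cross" ∨ obj = "white_corners" ∨ obj = "yellow_up") →
    (6 ≤ t.length ∧ 9 ≤ (t.getD 2 []).length ∧ 5 ≤ (t.getD 5 []).length)
instance (t : List (List String)) (obj : String) : Decidable (Pre_objetivo t obj) := by
  unfold Pre_objetivo; infer_instance

def pvWitness_objetivo : List (List String) × String := (rubikL, "white_corners")

def Spec_objetivo (t : List (List String)) (obj : String) (out : Bool) : Prop := out = objetivo_alt t obj
instance (t : List (List String)) (obj : String) (out : Bool) : Decidable (Spec_objetivo t obj out) := by unfold Spec_objetivo; infer_instance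

-- ===== CLAIM (what is proved, stated in full; the proofs are below) =====
def Claim_equal_objetivo : Prop := ∀ (t : List (List String)) (obj : String), Dom_objetivo t obj → Pre_objetivo t obj → Spec_objetivo t obj (objetivo t obj)

-- ===== LEMMAS AND PROOFS =====
theorem aGet_eq_bGet (t : List (List String)) (f i : Nat)
    (hf : f < t.length) (hi : i < (t.getD f []).length) :
    aGet t (f : Int) (i : Int) = bGet t f i := by
  unfold aGet bGet
  have hgf : t.getD f [] = t[f] := by
    simp [List.getD_eq_getElem?_getD, List.getElem?_eq_getElem hf]
  rw [hgf] at hi ⊢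
  simp [PySem.List.pyGet?_natCast, List.getElem?_eq_getElem hf, List.getElem?_eq_getElem hi,
    List.getD_eq_getElem?_getD]

theorem beq_decide_str (x v : String) : (x == v) = decide (x = v) := by
  by_cases h : x = v <;> simp [h]

-- ===== VERDICT (by name: the statement is the Claim_ definition above) =====
theorem objetivo_spec : Claim_equal_objetivo := by
  intro t obj _ hpre
  unfold Spec_objetivo objetivo objetivo_alt
  by_cases h1 : obj = "white_up"
  · subst h1
    obtain ⟨ht, hu, hf⟩ := hpre (by tauto)
    have e24 : aGet t 2 4 = bGet t 2 4 := aGet_eq_bGet t 2 4 (by omega) (by omega)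
    have e54 : aGet t 5 4 = bGet t 5 4 := aGet_eq_bGet t 5 4 (by omega) (by omega)
    have hg : goalTable.get? "white_up" = some whiteUpCs := by rfl
    simp [aWhiteUp, hg, whiteUpCs, e24, e54, beq_decide_str]
  by_cases h2 : obj = "white_cross"
  · subst h2
    obtain ⟨ht, hu, hf⟩ := hpre (by tauto)
    have e24 : aGet t 2 4 = bGet t 2 4 := aGet_eq_bGet t 2 4 (by omega) (by omega)
    have e54 : aGet t 5 4 = bGet t 5 4 := aGet_eq_bGet t 5 4 (by omega) (by omega)
    have e21 : aGet t 2 1 = bGet t 2 1 := aGet_eq_bGet t 2 1 (by omega) (by omega)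
    have e23 : aGet t 2 3 = bGet t 2 3 := aGet_eq_bGet t 2 3 (by omega) (by omega)
    have e25 : aGet t 2 5 = bGet t 2 5 := aGet_eq_bGet t 2 5 (by omega) (by omega)
    have e27 : aGet t 2 7 = bGet t 2 7 := aGet_eq_bGet t 2 7 (by omega) (by omega)
    have hg : goalTable.get? "white_cross" = some whiteCrossCs := by rfl
    simp [aWhiteCross, aWhiteUp, hg, whiteCrossCs, whiteUpCs, e24, e54, e21, e23, e25, e27,
      Bool.and_assoc, beq_decide_str]
  by_cases h3 : obj = "white_corners"
  · subst h3
    obtain ⟨ht, hu, hf⟩ := hpre (by tauto)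
    have e24 : aGet t 2 4 = bGet t 2 4 := aGet_eq_bGet t 2 4 (by omega) (by omega)
    have e54 : aGet t 5 4 = bGet t 5 4 := aGet_eq_bGet t 5 4 (by omega) (by omega)
    have e21 : aGet t 2 1 = bGet t 2 1 := aGet_eq_bGet t 2 1 (by omega) (by omega)
    have e23 : aGet t 2 3 = bGet t 2 3 := aGet_eq_bGet t 2 3 (by omega) (by omega)
    have e25 : aGet t 2 5 = bGet t 2 5 := aGet_eq_bGet t 2 5 (by omega) (by omega)
    have e27 : aGet t 2 7 = bGet t 2 7 := aGet_eq_bGet t 2 7 (by omega) (by omega)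
    have e20 : aGet t 2 0 = bGet t 2 0 := aGet_eq_bGet t 2 0 (by omega) (by omega)
    have e22 : aGet t 2 2 = bGet t 2 2 := aGet_eq_bGet t 2 2 (by omega) (by omega)
    have e26 : aGet t 2 6 = bGet t 2 6 := aGet_eq_bGet t 2 6 (by omega) (by omega)
    have e28 : aGet t 2 8 = bGet t 2 8 := aGet_eq_bGet t 2 8 (by omega) (by omega)
    have hg : goalTable.get? "white_corners" = some whiteCornersCs := by rfl
    simp [aWhiteCorners, aWhiteCross, aWhiteUp, hg, whiteCornersCs, whiteCrossCs, whiteUpCs,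
      e24, e54, e21, e23, e25, e27, e20, e22, e26, e28, Bool.and_assoc, beq_decide_str]
  by_cases h4 : obj = "yellow_up"
  · subst h4
    obtain ⟨ht, hu, hf⟩ := hpre (by tauto)
    have e24 : aGet t 2 4 = bGet t 2 4 := aGet_eq_bGet t 2 4 (by omega) (by omega)
    have e54 : aGet t 5 4 = bGet t 5 4 := aGet_eq_bGet t 5 4 (by omega) (by omega)
    have hg : goalTable.get? "yellow_up" = some [(2, 4, "4y"), (5, 4, "4o")] := by rfl
    simp [aYellowUp, hg, e24, e54, beq_decide_str]
  by_cases h5 : obj = "solve"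
  · subst h5
    by_cases ht : t = rubikL <;> simp [ht]
  · have hmk : goalTable = PySem.Dict.mk
        [("white_up", whiteUpCs), ("white_cross", whiteCrossCs),
         ("white_corners", whiteCornersCs), ("yellow_up", [(2, 4, "4y"), (5, 4, "4o")])] := by rfl
    have k1 : (("white_up" : String) == obj) = false := beq_eq_false_iff_ne.mpr (Ne.symm h1)
    have k2 : (("white_cross" : String) == obj) = false := beq_eq_false_iff_ne.mpr (Ne.symm h2)
    have k3 : (("white_corners" : String) == obj) = false := beq_eq_false_iff_ne.mpr (Ne.symm h3)
    have k4 : (("yellow_up" : String) == obj) = false := beq_eq_false_iff_ne.mpr (Ne.symm h4)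
    simp [h1, h2, h3, h4, h5, hmk, k1, k2, k3, k4, PySem.Dict.get?]
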